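-- pv_equiv track=rewrite | github.com/TxTH4N/trix_GUI | run_GUI.py | parse_colors
-- ===== SOURCE A (Python) =====
-- from typing import Optional, List
--
-- def parse_colors(spec: str, n: int) -> List[Optional[str]]:
--     """Parse comma-separated colors to length n. Accepts empty for defaults."""
--     out: List[Optional[str]] = [None] * n
--     if not spec.strip():
--         return out
--
--     parts = [p.strip() for p in spec.split(',')]
--     idx=0
--     for part in parts:
--         if idx >= n:
--             break
--         elif '*' in part:
--             nums, color = part.split('*')
--             try:
--                 nums = int(nums)
--             except:
--                 raise ValueError(f"Invalid color format: '{spec}', use format of number*color")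
--             out[idx:idx+nums] = [color]*nums
--             idx += nums
--         else:
--             out[idx] = part
--             idx += 1
--
--     return out
-- ===== SOURCE B (Python) =====
-- from typing import Optional, List
--
-- def parse_colors(spec: str, n: int) -> List[Optional[str]]:
--     """Parse comma-separated colors to length n. Accepts empty for defaults."""
--     if not spec.strip():
--         return [None] * n
--     return _fill([p.strip() for p in spec.split(',')], n, spec)
--
-- def _fill(parts: List[str], n: int, spec: str) -> List[Optional[str]]:
--     # remaining-budget recursion: n is how many slots are still owed
--     if not parts or n <= 0:
--         return [None] * n
--     part, rest = parts[0], parts[1:]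
--     if '*' in part:
--         nums, color = part.split('*')
--         try:
--             cnt = int(nums)
--         except:
--             raise ValueError(f"Invalid color format: '{spec}', use format of number*color")
--         return [color] * cnt + _fill(rest, n - cnt, spec)
--     return [part] + _fill(rest, n - 1, spec)
-- ===== Notes on version B (the rewrite author's own statement) =====
-- stated objective: alternative
-- what changed: A preallocates a [None]*n buffer and fills it in place with slice/index assignment driven by an idx counter; B is a remaining-budget recursion over the parts that builds the output front-to-back by list concatenation and pads with the still-owed Nones at the base case.
-- outside the precondition, e.g. on parse_colors('a,-1*b', 2): A returns ['a', None], B returns ['a', None, None]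
import Mathlib
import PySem

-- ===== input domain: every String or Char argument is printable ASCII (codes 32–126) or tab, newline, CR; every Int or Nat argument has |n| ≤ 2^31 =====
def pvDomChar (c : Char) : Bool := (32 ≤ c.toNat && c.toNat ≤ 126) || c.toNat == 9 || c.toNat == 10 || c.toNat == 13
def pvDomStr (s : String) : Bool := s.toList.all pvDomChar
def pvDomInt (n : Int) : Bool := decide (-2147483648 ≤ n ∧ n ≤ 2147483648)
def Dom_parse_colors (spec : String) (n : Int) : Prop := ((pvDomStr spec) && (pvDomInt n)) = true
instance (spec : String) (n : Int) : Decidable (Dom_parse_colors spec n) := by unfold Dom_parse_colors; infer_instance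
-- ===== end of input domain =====

-- B replaces A's preallocated [None]*n buffer, idx counter, and in-place slice/index assignment by a
-- remaining-budget recursion over the parts that builds the output front-to-back by concatenation and
-- pads at the base case (objective: alternative).

-- ===== PORT A =====
-- Python list setitem out[i] = v (exact: negative index wraps; the raise path returns out unchanged — excluded by Pre_)
def pySetItem (out : List (Option String)) (i : Int) (v : Option String) : List (Option String) :=
  let L : Int := out.length
  let j := if i < 0 then L + i else i
  if 0 ≤ j ∧ j < L then out.set j.toNat v else out

-- Python slice assignment out[i:j] = v (step 1, exact clamping: out[:i*] + v + out[max(i*,j*):])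
def pySliceAssign (out : List (Option String)) (i j : Int) (v : List (Option String)) : List (Option String) :=
  let L : Int := out.length
  let a := if i < 0 then max (L + i) 0 else min i L
  let b := if j < 0 then max (L + j) 0 else min j L
  out.take a.toNat ++ v ++ out.drop (max a b).toNat

-- the 'for part in parts' loop of A, state (out, idx); 'break'/'raise' return out
def aLoop (n : Int) : List String → List (Option String) → Int → List (Option String)
  | [], out, _ => out
  | part :: rest, out, idx =>
    if idx ≥ n then out                                    -- break
    else if PySem.Str.isIn "*" part then
      match ((PySem.Str.split? part "*").getD []) with
      | [nums, color] =>
        match PySem.Int.ofStr? nums with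
        | some cnt =>
            aLoop n rest (pySliceAssign out idx (idx + cnt) (PySem.List.pyRepeat [some color] cnt)) (idx + cnt)
        | none => out                                      -- raise ValueError (custom message)
      | _ => out                                           -- raise ValueError (unpacking)
    else aLoop n rest (pySetItem out idx (some part)) (idx + 1)

def parse_colors (spec : String) (n : Int) : List (Option String) :=
  let out := PySem.List.pyRepeat [(none : Option String)] n   -- [None] * n
  if PySem.Str.strip spec == "" then out
  else
    let parts := (((PySem.Str.split? spec ",").getD [])).map PySem.Str.strip
    aLoop n parts out 0

-- ===== PORT B =====
-- _fill: remaining-budget recursion; n is how many slots are still owed; 'raise' paths return []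
def bFill : Int → List String → List (Option String)
  | n, [] => PySem.List.pyRepeat [(none : Option String)] n
  | n, part :: rest =>
    if n ≤ 0 then PySem.List.pyRepeat [(none : Option String)] n
    else if PySem.Str.isIn "*" part then
      match ((PySem.Str.split? part "*").getD []) with
      | [nums, color] =>
        match PySem.Int.ofStr? nums with
        | some cnt => PySem.List.pyRepeat [some color] cnt ++ bFill (n - cnt) rest
        | none => []                                       -- raise ValueError (custom message)
      | _ => []                                            -- raise ValueError (unpacking)
    else some part :: bFill (n - 1) rest

def parse_colors_alt (spec : String) (n : Int) : List (Option String) :=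
  if PySem.Str.strip spec == "" then PySem.List.pyRepeat [(none : Option String)] n
  else bFill n ((((PySem.Str.split? spec ",").getD [])).map PySem.Str.strip)

-- ===== PRECONDITION & SPEC =====
-- a part is well formed: if it contains '*' it splits into exactly two pieces with a nonnegative int count
def partOK (p : String) : Bool :=
  !(PySem.Str.isIn "*" p) ||
    (match ((PySem.Str.split? p "*").getD []) with
     | [nums, _] =>
       match PySem.Int.ofStr? nums with
       | some cnt => decide (0 ≤ cnt)
       | none => false
     | _ => false)

-- how many output slots a part occupies (1 for a plain color; a '*' part its count, clamped to 0;
-- a malformed part counts as 1 — its weight only matters when it lies beyond the n-th slot)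
def partWeight (p : String) : Int :=
  if PySem.Str.isIn "*" p then
    match ((PySem.Str.split? p "*").getD []) with
    | [nums, _] =>
      match PySem.Int.ofStr? nums with
      | some cnt => max cnt 0
      | none => 1
    | _ => 1
  else 1

-- Pre_ excludes specs with a malformed '*' part or a negative count among the parts that start before the
-- n-th output slot (the parts A's loop reaches): on a malformed count or part A raises ValueError, and on a
-- negative count A's slice assignment shrinks the buffer and wraps indices (accidental leftover-state
-- values, or an IndexError) — behaviour B, which simply owes n slots and pads, does not reproduce.
def Pre_parse_colors (spec : String) (n : Int) : Prop :=
  ∀ i, (h : i < ((((PySem.Str.split? spec ",").getD [])).map PySem.Str.strip).length) →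
    ((((((PySem.Str.split? spec ",").getD [])).map PySem.Str.strip).take i).map partWeight).sum < n →
    partOK (((((PySem.Str.split? spec ",").getD [])).map PySem.Str.strip)[i]) = true
instance (spec : String) (n : Int) : Decidable (Pre_parse_colors spec n) := by unfold Pre_parse_colors; infer_instance

def pvWitness_parse_colors : String × Int := ("a, 2*b ,c", 3)

def Spec_parse_colors (spec : String) (n : Int) (out : List (Option String)) : Prop := out = parse_colors_alt spec n
instance (spec : String) (n : Int) (out : List (Option String)) : Decidable (Spec_parse_colors spec n out) := by unfold Spec_parse_colors; infer_instance

-- ===== CLAIM (what is proved, stated in full; the proofs are below) =====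
def Claim_equal_parse_colors : Prop := ∀ (spec : String) (n : Int), Dom_parse_colors spec n → Pre_parse_colors spec n → Spec_parse_colors spec n (parse_colors spec n)

-- ===== LEMMAS AND PROOFS =====
-- okBudget n parts: every part A's loop actually reaches (those before the budget n is used up) is a
-- well-formed token (proof-side bridge between Pre_ and the loop invariant)
def okBudget : Int → List String → Bool
  | _, [] => true
  | n, p :: rest =>
    if n ≤ 0 then true
    else if PySem.Str.isIn "*" p then
      match ((PySem.Str.split? p "*").getD []) with
      | [nums, _] =>
        match PySem.Int.ofStr? nums with
        | some cnt => decide (0 ≤ cnt) && okBudget (n - cnt) rest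
        | none => false
      | _ => false
    else okBudget (n - 1) rest


-- Pre_'s prefix-sum condition implies the budget predicate the loop invariant consumes
theorem pre_okBudget : ∀ (parts : List String) (n : Int),
    (∀ i, (h : i < parts.length) → ((parts.take i).map partWeight).sum < n → partOK (parts[i]) = true) →
    okBudget n parts = true := by
  intro parts
  induction parts with
  | nil => intro n _; rfl
  | cons p rest ih =>
    intro n H
    rw [okBudget]
    by_cases hn : n ≤ 0
    · simp [hn]
    · simp only [if_neg hn]
      have h0 : partOK p = true := by
        have := H 0 (by simp) (by simpa using (by omega : (0:Int) < n))
        simpa using this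
      have shift : ∀ i, (h : i < rest.length) →
          ((rest.take i).map partWeight).sum < n - partWeight p → partOK (rest[i]) = true := by
        intro i hi hs
        have hlt : ((((p :: rest).take (i+1)).map partWeight)).sum < n := by
          simp only [List.take_succ_cons, List.map_cons, List.sum_cons]; omega
        have := H (i+1) (by simpa using Nat.succ_lt_succ hi) hlt
        simpa using this
      cases hstar : PySem.Str.isIn "*" p with
      | false =>
        simp only [Bool.false_eq_true, if_false]
        have hw : partWeight p = 1 := by
          simp only [partWeight, hstar, Bool.false_eq_true, if_false]
        exact ih (n - 1) (by rw [← hw] at *; exact shift)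
      | true =>
        rw [partOK, hstar] at h0
        simp only [Bool.not_true, Bool.false_or] at h0
        cases hsplit : ((PySem.Str.split? p "*").getD []) with
        | nil => rw [hsplit] at h0; simp at h0
        | cons nums tl =>
          cases tl with
          | nil => rw [hsplit] at h0; simp at h0
          | cons color tl2 =>
            cases tl2 with
            | cons _ _ => rw [hsplit] at h0; simp at h0
            | nil =>
              rw [hsplit] at h0
              cases hint : PySem.Int.ofStr? nums with
              | none => simp [hint] at h0
              | some cnt =>
                simp only [hint, decide_eq_true_eq] at h0
                have hw : partWeight p = cnt := by
                  simp only [partWeight, hstar, if_true, hsplit, hint]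
                  omega
                simp only [if_true, hint, Bool.and_eq_true, decide_eq_true_eq]
                exact ⟨h0, ih (n - cnt) (by rw [← hw] at *; exact shift)⟩

-- A's 'out[idx] = part' on the invariant buffer appends to the processed prefix
theorem setItem_inv (acc : List (Option String)) (k : Nat) (hk : 1 ≤ k) (v : Option String) :
    pySetItem (acc ++ List.replicate k none) (acc.length : Int) v
      = (acc ++ [v]) ++ List.replicate (k - 1) none := by
  unfold pySetItem
  have h1 : ¬ ((acc.length : Int) < 0) := by omega
  have h2 : (0:Int) ≤ (acc.length : Int) ∧ (acc.length : Int) < ((acc ++ List.replicate k none).length : Int) := by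
    simp; omega
  simp only [h1, if_false, h2, Int.toNat_natCast]
  obtain ⟨k', rfl⟩ : ∃ k', k = k' + 1 := ⟨k - 1, by omega⟩
  rw [List.set_append_right _ _ (Nat.le_refl _)]
  simp [List.replicate_succ]

-- A's slice assignment 'out[idx:idx+cnt] = [color]*cnt' on the invariant buffer
theorem sliceAssign_inv (acc v : List (Option String)) (k : Nat) (cnt : Int) (hc : 0 ≤ cnt) :
    pySliceAssign (acc ++ List.replicate k none) (acc.length : Int) ((acc.length : Int) + cnt) v
      = (acc ++ v) ++ List.replicate (k - cnt.toNat) none := by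
  unfold pySliceAssign
  have hL : ((acc ++ List.replicate k none).length : Int) = (acc.length : Int) + k := by simp
  have h1 : ¬ ((acc.length : Int) < 0) := by omega
  have h2 : ¬ ((acc.length : Int) + cnt < 0) := by omega
  have ha : min (acc.length : Int) ((acc ++ List.replicate k none).length : Int) = (acc.length : Int) := by
    rw [hL]; omega
  simp only [h1, h2, if_false, ha]
  have hb : max (acc.length : Int) (min ((acc.length : Int) + cnt) ((acc ++ List.replicate k none).length : Int))
      = (acc.length : Int) + min cnt (k : Int) := by rw [hL]; omega
  rw [hb]
  have hdrop : ((acc.length : Int) + min cnt (k : Int)).toNat = acc.length + min cnt.toNat k := by omega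
  rw [hdrop, Int.toNat_natCast, List.take_left, List.drop_length_add_append]
  have hkk : k - min cnt.toNat k = k - cnt.toNat := by omega
  simp [List.drop_replicate, hkk]

-- invariant: A's buffer is the processed prefix acc plus (n - |acc|)⁺ Nones, idx = |acc|;
-- then the rest of A's loop computes acc ++ bFill (n - |acc|) parts
theorem loopEq (n : Int) (parts : List String) :
    ∀ acc : List (Option String), okBudget (n - (acc.length : Int)) parts = true →
      aLoop n parts (acc ++ List.replicate (n - (acc.length : Int)).toNat none) (acc.length : Int)
        = acc ++ bFill (n - (acc.length : Int)) parts := by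
  induction parts with
  | nil =>
    intro acc _
    simp [aLoop, bFill, PySem.List.pyRepeat_singleton]
  | cons part rest ih =>
    intro acc hok
    by_cases hge : (acc.length : Int) ≥ n
    · have hm : n - (acc.length : Int) ≤ 0 := by omega
      have h0 : (n - (acc.length : Int)).toNat = 0 := by omega
      have hb : bFill (n - (acc.length : Int)) (part :: rest)
          = PySem.List.pyRepeat [(none : Option String)] (n - (acc.length : Int)) := by
        simp [bFill, hm]
      rw [hb, h0, PySem.List.pyRepeat_singleton, h0]
      simp only [List.replicate_zero, List.append_nil]
      cases PySem.Str.isIn "*" part <;> simp [aLoop, hge]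
    · have hlt : (acc.length : Int) < n := by omega
      have hmpos : ¬ (n - (acc.length : Int) ≤ 0) := by omega
      have hk1 : 1 ≤ (n - (acc.length : Int)).toNat := by omega
      rw [okBudget] at hok
      simp only [if_neg hmpos] at hok
      cases hstar : PySem.Str.isIn "*" part with
      | false =>
        rw [hstar] at hok
        simp only [Bool.false_eq_true, if_false] at hok
        simp only [aLoop, hstar, Bool.false_eq_true, if_false, ge_iff_le, hge]
        rw [setItem_inv _ _ hk1 (some part)]
        have h1 : n - (((acc ++ [some part]).length : Int)) = n - (acc.length : Int) - 1 := by
          simp; omega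
        have hok' : okBudget (n - (((acc ++ [some part]).length : Int))) rest = true := by
          rw [h1]; exact hok
        have := ih (acc ++ [some part]) hok'
        rw [h1] at this
        have hpad : (n - (acc.length : Int) - 1).toNat = (n - (acc.length : Int)).toNat - 1 := by omega
        rw [hpad] at this
        have hL : ((acc ++ [some part]).length : Int) = (acc.length : Int) + 1 := by simp
        rw [hL] at this
        rw [this]
        simp only [bFill, if_neg hmpos, hstar, Bool.false_eq_true, if_false]
        simp
      | true =>
        rw [hstar] at hok
        simp only [if_true] at hok
        cases hsplit : ((PySem.Str.split? part "*").getD []) with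
        | nil => rw [hsplit] at hok; simp at hok
        | cons nums tl =>
          cases tl with
          | nil => rw [hsplit] at hok; simp at hok
          | cons color tl2 =>
            cases tl2 with
            | cons _ _ => rw [hsplit] at hok; simp at hok
            | nil =>
              rw [hsplit] at hok
              cases hint : PySem.Int.ofStr? nums with
              | none => simp [hint] at hok
              | some cnt =>
                simp only [hint, Bool.and_eq_true, decide_eq_true_eq] at hok
                obtain ⟨hc, hok⟩ := hok
                simp only [aLoop, hstar, if_true, hsplit, hint, ge_iff_le, hge, if_false]
                rw [PySem.List.pyRepeat_singleton, sliceAssign_inv _ _ _ _ hc]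
                have h1 : n - (((acc ++ List.replicate cnt.toNat (some color)).length : Int))
                    = n - (acc.length : Int) - cnt := by simp; omega
                have hok' : okBudget (n - (((acc ++ List.replicate cnt.toNat (some color)).length : Int))) rest = true := by
                  rw [h1]; exact hok
                have := ih (acc ++ List.replicate cnt.toNat (some color)) hok'
                rw [h1] at this
                have hpad : (n - (acc.length : Int) - cnt).toNat
                    = (n - (acc.length : Int)).toNat - cnt.toNat := by omega
                rw [hpad] at this
                have hL : ((acc ++ List.replicate cnt.toNat (some color)).length : Int)
                    = (acc.length : Int) + cnt := by simp; omega
                rw [hL] at this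
                rw [this]
                simp only [bFill, if_neg hmpos, hstar, if_true, hsplit, hint]
                rw [PySem.List.pyRepeat_singleton]
                simp [List.append_assoc]

-- ===== VERDICT (by name: the statement is the Claim_ definition above) =====
theorem parse_colors_spec : Claim_equal_parse_colors := by
  intro spec n _hdom hpre
  unfold Spec_parse_colors parse_colors parse_colors_alt
  by_cases hs : PySem.Str.strip spec == ""
  · simp [hs]
  · simp only [hs, if_false, Bool.false_eq_true]
    have hok := pre_okBudget ((((PySem.Str.split? spec ",").getD [])).map PySem.Str.strip) n hpre
    have h := loopEq n ((((PySem.Str.split? spec ",").getD [])).map PySem.Str.strip) [] (by simpa using hok)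
    simpa [PySem.List.pyRepeat_singleton] using h
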